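-- pv_equiv track=rewrite | github.com/savan77/Self-Driving-Car-Nanodegree | scripts/first.py | join_lines
-- ===== SOURCE A (Python) =====
-- def join_lines(lines):
-- 	prev = 0,0
-- 	f = 0,0
-- 	first = True
-- 	new_lines = []
-- 	for line in lines:
--
-- 		if first:
-- 			first = False
-- 		else:
-- 			new_lines.append([prev[0]+1, prev[1]+1,line[0]+1,line[1]+1])
-- 		prev = line[2], line[3]
-- 	return new_lines
-- ===== SOURCE B (Python) =====
-- def join_lines(lines):
--     # Stage 1: flatten the segments into a stream of shifted endpoint points.
--     pts = []
--     for x1, y1, x2, y2, *_ in lines: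
--         pts.append((x1 + 1, y1 + 1))
--         pts.append((x2 + 1, y2 + 1))
--     # Stage 2: drop the very first start and the very last end; the remaining
--     # stream chunks into (end, next start) pairs, each of which is a joining line.
--     inner = pts[1:-1]
--     it = iter(inner)
--     return [[p[0], p[1], q[0], q[1]] for p, q in zip(it, it)]
-- ===== Notes on version B (the rewrite author's own statement) =====
-- stated objective: alternative
-- what changed: Instead of a loop carrying prev/first state, B stages the work: it flattens all segments into one stream of shifted endpoint points, slices off the first start and last end with pts[1:-1], and chunks the remaining stream into consecutive (end, next-start) pairs via zip(it, it).
import Mathlib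
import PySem

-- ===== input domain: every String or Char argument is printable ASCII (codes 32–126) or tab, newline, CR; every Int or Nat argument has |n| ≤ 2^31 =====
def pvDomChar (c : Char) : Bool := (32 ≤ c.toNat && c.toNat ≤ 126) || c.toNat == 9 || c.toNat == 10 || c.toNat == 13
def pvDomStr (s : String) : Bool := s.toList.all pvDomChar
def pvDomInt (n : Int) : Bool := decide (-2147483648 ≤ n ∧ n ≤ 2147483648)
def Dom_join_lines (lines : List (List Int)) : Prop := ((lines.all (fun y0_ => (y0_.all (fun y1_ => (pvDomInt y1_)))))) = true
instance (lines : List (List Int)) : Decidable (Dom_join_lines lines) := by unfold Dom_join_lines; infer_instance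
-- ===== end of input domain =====

-- B restages the computation: it first flattens the segments into a stream of shifted endpoint
-- points, slices off the first start and the last end, and then chunks the remaining stream
-- into consecutive (end, next-start) pairs — no running prev/first state.

-- ===== PORT A =====
-- loop state: (prev, first, new_lines); pyGetD gives line[i] (in range on Pre_, where Python returns)
def join_lines (lines : List (List Int)) : List (List Int) :=
  (lines.foldl
    (fun (st : (Int × Int) × Bool × List (List Int)) line =>
      let prev := st.1
      let acc' := if st.2.1 then st.2.2
                  else st.2.2 ++ [[prev.1 + 1, prev.2 + 1,
                                   PySem.List.pyGetD line 0 0 + 1, PySem.List.pyGetD line 1 0 + 1]]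
      ((PySem.List.pyGetD line 2 0, PySem.List.pyGetD line 3 0), false, acc'))
    ((0, 0), true, [])).2.2

-- ===== PORT B =====
-- zip(it, it) over one iterator chunks a list into consecutive pairs; ported structurally:
def pvChunk2 : List (Int × Int) → List ((Int × Int) × (Int × Int))
  | p :: q :: t => (p, q) :: pvChunk2 t
  | _ => []

def join_lines_alt (lines : List (List Int)) : List (List Int) :=
  let pts := lines.foldl
    (fun acc l => acc ++ [(PySem.List.pyGetD l 0 0 + 1, PySem.List.pyGetD l 1 0 + 1),
                          (PySem.List.pyGetD l 2 0 + 1, PySem.List.pyGetD l 3 0 + 1)]) []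
  let inner := PySem.List.slice pts (some 1) (some (-1))
  (pvChunk2 inner).map (fun pq => [pq.1.1, pq.1.2, pq.2.1, pq.2.2])

-- ===== PRECONDITION & SPEC =====
-- A indexes every line at [2],[3] (and non-first lines at [0],[1]); B unpacks x1,y1,x2,y2,*_;
-- a line shorter than 4 makes both Pythons raise, so exactly those inputs are excluded.
def Pre_join_lines (lines : List (List Int)) : Prop := ∀ l ∈ lines, 4 ≤ l.length
instance (lines : List (List Int)) : Decidable (Pre_join_lines lines) := by unfold Pre_join_lines; infer_instance
def pvWitness_join_lines : List (List Int) := [[1, 2, 3, 4], [5, 6, 7, 8]]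

def Spec_join_lines (lines : List (List Int)) (out : List (List Int)) : Prop := out = join_lines_alt lines
instance (lines : List (List Int)) (out : List (List Int)) : Decidable (Spec_join_lines lines out) := by unfold Spec_join_lines; infer_instance

-- ===== CLAIM (what is proved, stated in full; the proofs are below) =====
def Claim_equal_join_lines : Prop := ∀ (lines : List (List Int)), Dom_join_lines lines → Pre_join_lines lines → Spec_join_lines lines (join_lines lines)

-- ===== LEMMAS AND PROOFS =====

-- shifted start / end points of a segment
def pvS (l : List Int) : Int × Int := (PySem.List.pyGetD l 0 0 + 1, PySem.List.pyGetD l 1 0 + 1)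
def pvE (l : List Int) : Int × Int := (PySem.List.pyGetD l 2 0 + 1, PySem.List.pyGetD l 3 0 + 1)

-- the common recursive description both ports are reduced to
def pvJoin : List (List Int) → List (List Int)
  | a :: b :: r => [(pvE a).1, (pvE a).2, (pvS b).1, (pvS b).2] :: pvJoin (b :: r)
  | _ => []

-- A's loop body, named
def pvStep (st : (Int × Int) × Bool × List (List Int)) (line : List Int) :
    (Int × Int) × Bool × List (List Int) :=
  let prev := st.1
  let acc' := if st.2.1 then st.2.2
              else st.2.2 ++ [[prev.1 + 1, prev.2 + 1,
                               PySem.List.pyGetD line 0 0 + 1, PySem.List.pyGetD line 1 0 + 1]]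
  ((PySem.List.pyGetD line 2 0, PySem.List.pyGetD line 3 0), false, acc')

theorem pvA_go (rest : List (List Int)) : ∀ (a : List Int) (acc : List (List Int)),
    (rest.foldl pvStep ((PySem.List.pyGetD a 2 0, PySem.List.pyGetD a 3 0), false, acc)).2.2
      = acc ++ pvJoin (a :: rest) := by
  induction rest with
  | nil => intro a acc; simp [pvJoin]
  | cons b rs ih =>
    intro a acc
    simp only [List.foldl_cons]
    rw [show pvStep ((PySem.List.pyGetD a 2 0, PySem.List.pyGetD a 3 0), false, acc) b
          = ((PySem.List.pyGetD b 2 0, PySem.List.pyGetD b 3 0), false,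
             acc ++ [[(pvE a).1, (pvE a).2, (pvS b).1, (pvS b).2]]) from rfl]
    rw [ih b]
    simp [pvJoin]

theorem pvA_eq_join (lines : List (List Int)) : join_lines lines = pvJoin lines := by
  unfold join_lines
  cases lines with
  | nil => rfl
  | cons a rest =>
    have hstep : (fun (st : (Int × Int) × Bool × List (List Int)) line =>
        let prev := st.1
        let acc' := if st.2.1 then st.2.2
                    else st.2.2 ++ [[prev.1 + 1, prev.2 + 1,
                                     PySem.List.pyGetD line 0 0 + 1, PySem.List.pyGetD line 1 0 + 1]]
        ((PySem.List.pyGetD line 2 0, PySem.List.pyGetD line 3 0), false, acc')) = pvStep := rfl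
    simp only [List.foldl_cons, hstep]
    rw [show pvStep ((0, 0), true, []) a
          = ((PySem.List.pyGetD a 2 0, PySem.List.pyGetD a 3 0), false, []) from rfl]
    rw [pvA_go rest a []]
    rfl

-- pts[1:-1] is drop-first-then-drop-last
theorem pv_slice_inner (xs : List (Int × Int)) :
    PySem.List.slice xs (some 1) (some (-1)) = xs.tail.dropLast := by
  unfold PySem.List.slice PySem.List.clampIdx
  rcases xs with _ | ⟨a, t⟩
  · rfl
  · simp [List.dropLast_eq_take]
    split <;> omega

theorem pvB_go (lines : List (List Int)) :
    (pvChunk2 ((lines.flatMap (fun l => [pvS l, pvE l])).tail.dropLast)).map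
      (fun pq => [pq.1.1, pq.1.2, pq.2.1, pq.2.2]) = pvJoin lines := by
  induction lines with
  | nil => rfl
  | cons a t ih =>
    cases t with
    | nil => simp [pvChunk2, pvJoin]
    | cons b r =>
      simp only [List.flatMap_cons, List.cons_append, List.nil_append, List.tail_cons] at ih ⊢
      rw [List.dropLast_cons₂, List.dropLast_cons₂]
      simp only [pvChunk2, List.map_cons]
      rw [show pvJoin (a :: b :: r) = [(pvE a).1, (pvE a).2, (pvS b).1, (pvS b).2] :: pvJoin (b :: r) from rfl]
      exact congrArg _ ih

theorem pvB_eq_join (lines : List (List Int)) : join_lines_alt lines = pvJoin lines := by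
  simp only [join_lines_alt]
  rw [PySem.List.foldl_append_eq_flatMap]
  rw [show (fun (l : List Int) => [(PySem.List.pyGetD l 0 0 + 1, PySem.List.pyGetD l 1 0 + 1),
        (PySem.List.pyGetD l 2 0 + 1, PySem.List.pyGetD l 3 0 + 1)])
      = (fun l => [pvS l, pvE l]) from rfl]
  rw [List.nil_append, pv_slice_inner]
  exact pvB_go lines

-- ===== VERDICT (by name: the statement is the Claim_ definition above) =====
theorem join_lines_spec : Claim_equal_join_lines := by
  intro lines _ _
  unfold Spec_join_lines
  rw [pvA_eq_join, pvB_eq_join]
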